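-- pv_equiv track=rewrite | github.com/DivyaJyot/NSR-Mapper-Python | src/converter/falu_handlers.py | get_UGCSI_gsmServiceControlFunctionAddress_fromFalu
-- ===== SOURCE A (Python) =====
-- from itertools import zip_longest
--
-- def get_UGCSI_gsmServiceControlFunctionAddress_fromFalu(globalUcsiScpAddress):
--     globalUcsiScpAddress = str(globalUcsiScpAddress)
--     nokiaVal = None
--
--     args = [iter(globalUcsiScpAddress)] * 1
--     y = [''.join(k) for k in zip_longest(*args)]
--     for i in y[:2]:
--         y.remove(i)
--     nokiaVal = "".join(y)
--
--     return nokiaVal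
-- ===== SOURCE B (Python) =====
-- def get_UGCSI_gsmServiceControlFunctionAddress_fromFalu(globalUcsiScpAddress):
--     return str(globalUcsiScpAddress)[2:]
-- ===== Notes on version B (the rewrite author's own statement) =====
-- stated objective: simpler
-- what changed: Replaces the zip_longest single-char chunking, intermediate list and the two list.remove calls with a single slice s[2:] (dropping the first two characters directly).
import Mathlib
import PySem

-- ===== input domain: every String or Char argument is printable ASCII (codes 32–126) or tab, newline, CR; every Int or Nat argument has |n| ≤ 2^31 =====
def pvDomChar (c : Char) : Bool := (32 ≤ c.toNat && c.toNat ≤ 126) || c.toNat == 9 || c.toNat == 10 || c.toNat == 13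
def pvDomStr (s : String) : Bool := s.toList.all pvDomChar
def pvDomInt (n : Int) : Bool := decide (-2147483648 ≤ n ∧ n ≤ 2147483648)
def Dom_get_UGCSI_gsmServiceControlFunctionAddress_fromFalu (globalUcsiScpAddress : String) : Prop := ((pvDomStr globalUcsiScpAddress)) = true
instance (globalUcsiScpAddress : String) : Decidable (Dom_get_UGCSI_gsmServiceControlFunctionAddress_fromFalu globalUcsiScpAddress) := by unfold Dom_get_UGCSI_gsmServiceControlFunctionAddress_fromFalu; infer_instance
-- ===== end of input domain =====

-- B replaces A's zip_longest char-chunking, intermediate list and two list.remove calls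
-- with one direct slice s[2:] (objective: simpler).

-- ===== PORT A =====
-- y = [''.join(k) for k in zip_longest(iter(s))] — chunks of size 1, i.e. one string per char
-- for i in y[:2]: y.remove(i)   (remove never fails here: i is taken from y itself)
-- return "".join(y)
def get_UGCSI_gsmServiceControlFunctionAddress_fromFalu (globalUcsiScpAddress : String) : String :=
  let y : List String := globalUcsiScpAddress.toList.map (fun c => PySem.Str.join "" [String.ofList [c]])
  let y2 : List String := (PySem.List.slice y none (some 2)).foldl
    (fun acc i => (PySem.List.remove? acc i).getD acc) y
  PySem.Str.join "" y2

-- ===== PORT B =====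
-- return str(globalUcsiScpAddress)[2:]
def get_UGCSI_gsmServiceControlFunctionAddress_fromFalu_alt (globalUcsiScpAddress : String) : String :=
  PySem.Str.slice globalUcsiScpAddress (some 2) none

-- ===== PRECONDITION & SPEC =====
def Spec_get_UGCSI_gsmServiceControlFunctionAddress_fromFalu (globalUcsiScpAddress : String) (out : String) : Prop := out = get_UGCSI_gsmServiceControlFunctionAddress_fromFalu_alt globalUcsiScpAddress
instance (globalUcsiScpAddress : String) (out : String) : Decidable (Spec_get_UGCSI_gsmServiceControlFunctionAddress_fromFalu globalUcsiScpAddress out) := by unfold Spec_get_UGCSI_gsmServiceControlFunctionAddress_fromFalu; infer_instance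

-- ===== CLAIM (what is proved, stated in full; the proofs are below) =====
def Claim_equal_get_UGCSI_gsmServiceControlFunctionAddress_fromFalu : Prop := ∀ (globalUcsiScpAddress : String), Dom_get_UGCSI_gsmServiceControlFunctionAddress_fromFalu globalUcsiScpAddress → Spec_get_UGCSI_gsmServiceControlFunctionAddress_fromFalu globalUcsiScpAddress (get_UGCSI_gsmServiceControlFunctionAddress_fromFalu globalUcsiScpAddress)

-- ===== LEMMAS AND PROOFS =====
theorem pv_join_single (x : String) : PySem.Str.join "" [x] = x := by
  apply String.toList_inj.mp
  simp [PySem.Str.toList_join, PySem.Chars.join_singleton]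

theorem pv_main (s : String) :
    get_UGCSI_gsmServiceControlFunctionAddress_fromFalu s
      = get_UGCSI_gsmServiceControlFunctionAddress_fromFalu_alt s := by
  apply String.toList_inj.mp
  unfold get_UGCSI_gsmServiceControlFunctionAddress_fromFalu
    get_UGCSI_gsmServiceControlFunctionAddress_fromFalu_alt
  simp only [pv_join_single]
  rw [PySem.Str.toList_slice, PySem.Chars.slice_eq_listSlice,
    PySem.List.slice_from]
  swap
  · norm_num
  rw [show (PySem.List.slice (s.toList.map (fun c => String.ofList [c])) none (some 2))
      = (s.toList.map (fun c => String.ofList [c])).take 2 from by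
        rw [show ((2:Int)) = ((2:Nat):Int) from by norm_num, PySem.List.slice_to_natCast]]
  rcases h : s.toList with _ | ⟨a, _ | ⟨b, t⟩⟩ <;>
    simp [PySem.Str.toList_join, PySem.List.remove?_cons_self,
      PySem.Chars.join_nil_singletons, List.map_map, Function.comp_def, String.toList_ofList]

-- ===== VERDICT (by name: the statement is the Claim_ definition above) =====
theorem get_UGCSI_gsmServiceControlFunctionAddress_fromFalu_spec : Claim_equal_get_UGCSI_gsmServiceControlFunctionAddress_fromFalu := by
  intro s _
  exact pv_main s
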